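-- pv_equiv track=rewrite | github.com/harshitpoddar09/InterviewBit-Solutions | Programming/Hashing/Incremental Hash/An Increment Problem.py | solve
-- ===== SOURCE A (Python) =====
-- def solve(A):
--     d={}
--     for i in range(len(A)):
--         cur=A[i]
--         if cur in d:
--             d[cur].sort()
--             A[d[cur][0]]+=1
--             if cur+1 in d:
--                 d[cur+1].append(d[cur][0])
--             else:
--                 d[cur+1]=[d[cur][0]]
--             d[cur].pop(0)
--             d[cur].append(i)
--         else:
--             d[cur]=[i]
--     return A
-- ===== SOURCE B (Python) =====
-- def solve(A):
--     # value -> skew heap (None or (root, left, right)) of the indices currently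
--     # holding that value; the min index is popped in O(log n) instead of A's
--     # full re-sort of the bucket on every repeated value.
--     def meld(a, b):
--         if a is None:
--             return b
--         if b is None:
--             return a
--         if b[0] < a[0]:
--             a, b = b, a
--         return (a[0], meld(a[2], b), a[1])
--
--     heaps = {}
--     for i in range(len(A)):
--         cur = A[i]
--         h = heaps.get(cur)
--         if h is None:
--             heaps[cur] = (i, None, None)
--         else:
--             j, left, right = h
--             A[j] += 1
--             heaps[cur + 1] = meld((j, None, None), heaps.get(cur + 1))
--             heaps[cur] = meld((i, None, None), meld(left, right))
--     return A
-- ===== Notes on version B (the rewrite author's own statement) =====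
-- stated objective: faster
-- what changed: A keeps a plain list of indices per value and re-sorts the whole bucket on every repeated value just to read its minimum; B keeps a skew heap of indices per value and pops/melds the minimum index, so no sorting happens at all.
import Mathlib
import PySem

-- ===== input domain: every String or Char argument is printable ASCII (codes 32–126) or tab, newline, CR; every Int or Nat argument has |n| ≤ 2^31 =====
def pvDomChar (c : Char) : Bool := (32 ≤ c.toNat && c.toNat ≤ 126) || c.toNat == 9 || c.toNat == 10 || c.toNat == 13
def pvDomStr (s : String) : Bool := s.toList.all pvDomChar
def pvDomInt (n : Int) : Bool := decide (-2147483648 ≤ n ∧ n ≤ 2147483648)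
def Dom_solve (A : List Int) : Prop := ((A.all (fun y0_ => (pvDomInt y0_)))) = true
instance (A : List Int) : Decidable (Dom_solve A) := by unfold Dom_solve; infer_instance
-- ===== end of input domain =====

-- B replaces A's per-value index lists (re-sorted on every repeated value just to read
-- their minimum) by per-value skew heaps: the min index is popped and melded instead of
-- sorting (objective: faster, asymptotic). Both A and B mutate the argument list in
-- place in Python; the equivalence proved here is about the return value.

-- ===== PORT A =====
-- one iteration of A's for-loop; state = (A, d), i is the loop index
def solveStepA (st : List Int × PySem.Dict Int (List Int)) (i : Nat) :
    List Int × PySem.Dict Int (List Int) :=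
  let arr := st.1
  let d := st.2
  let cur := arr.getD i 0                              -- cur = A[i] (i always in range)
  match d.get? cur with
  | none => (arr, d.insert cur [(i : Int)])            -- d[cur] = [i]
  | some l =>
    let ls := PySem.List.sorted l (fun x => x) false   -- d[cur].sort()
    let d1 := d.insert cur ls
    let j := ls.headD 0                                -- d[cur][0] (bucket never empty)
    let arr' := arr.set j.toNat (arr.getD j.toNat 0 + 1)   -- A[d[cur][0]] += 1 (j ≥ 0 always)
    let d2 := match d1.get? (cur + 1) with
      | some m => d1.insert (cur + 1) (m ++ [j])       -- d[cur+1].append(d[cur][0])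
      | none => d1.insert (cur + 1) [j]                -- d[cur+1] = [d[cur][0]]
    let d3 := d2.insert cur (ls.drop 1 ++ [(i : Int)]) -- d[cur].pop(0); d[cur].append(i)
    (arr', d3)

def solveLoopA : Nat → Nat → (List Int × PySem.Dict Int (List Int)) →
    List Int × PySem.Dict Int (List Int)
  | 0, _, st => st
  | n + 1, i, st => solveLoopA n (i + 1) (solveStepA st i)

def solve (A : List Int) : List Int := (solveLoopA A.length 0 (A, PySem.Dict.empty)).1

-- ===== PORT B =====
-- Source B's heaps are None or nested tuples (root, left, right); port: an inductive tree,
-- with .nil for Python's None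
inductive SHeap : Type where
  | nil : SHeap
  | node : Int → SHeap → SHeap → SHeap
deriving DecidableEq, Repr

-- termination measures for sMeld (named so the recursion can cite them)
theorem sMeld_dec1 (va : Int) (la ra : SHeap) (vb : Int) (lb rb : SHeap) :
    sizeOf rb + sizeOf (SHeap.node va la ra) <
      sizeOf (SHeap.node va la ra) + sizeOf (SHeap.node vb lb rb) := by
  simp; omega

theorem sMeld_dec2 (va : Int) (la ra : SHeap) (vb : Int) (lb rb : SHeap) :
    sizeOf ra + sizeOf (SHeap.node vb lb rb) <
      sizeOf (SHeap.node va la ra) + sizeOf (SHeap.node vb lb rb) := by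
  simp

-- Source B's recursive meld of two skew heaps, step for step (the a,b swap inlined)
def sMeld : SHeap → SHeap → SHeap
  | .nil, b => b
  | .node va la ra, .nil => .node va la ra
  | .node va la ra, .node vb lb rb =>
    if vb < va then .node vb (sMeld rb (.node va la ra)) lb
    else .node va (sMeld ra (.node vb lb rb)) la
termination_by a b => sizeOf a + sizeOf b
decreasing_by
  · exact sMeld_dec1 va la ra vb lb rb
  · exact sMeld_dec2 va la ra vb lb rb

-- one iteration of Source B's for-loop; state = (A, heaps)
def solveStepB (st : List Int × PySem.Dict Int SHeap) (i : Nat) :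
    List Int × PySem.Dict Int SHeap :=
  let arr := st.1
  let d := st.2
  let cur := arr.getD i 0                              -- cur = A[i]
  match d.get? cur with
  | none => (arr, d.insert cur (.node (i : Int) .nil .nil))   -- heaps[cur] = (i, None, None)
  | some .nil => (arr, d)                              -- unreachable (stored heaps are tuples); totality guard
  | some (.node j left right) =>                       -- j, left, right = h
    let arr' := arr.set j.toNat (arr.getD j.toNat 0 + 1)      -- A[j] += 1
    let d1 := d.insert (cur + 1)
      (sMeld (.node j .nil .nil) ((d.get? (cur + 1)).getD .nil))  -- heaps[cur+1] = meld((j,..), heaps.get(cur+1))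
    let d2 := d1.insert cur (sMeld (.node (i : Int) .nil .nil) (sMeld left right))  -- heaps[cur] = meld((i,..), meld(left, right))
    (arr', d2)

def solve_alt (A : List Int) : List Int :=
  ((List.range A.length).foldl solveStepB (A, PySem.Dict.empty)).1

-- ===== PRECONDITION & SPEC =====
def Spec_solve (A : List Int) (out : List Int) : Prop := out = solve_alt A
instance (A : List Int) (out : List Int) : Decidable (Spec_solve A out) := by
  unfold Spec_solve; infer_instance

-- ===== CLAIM (what is proved, stated in full; the proofs are below) =====
def Claim_equal_solve : Prop := ∀ (A : List Int), Dom_solve A → Spec_solve A (solve A)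

-- ===== LEMMAS AND PROOFS =====

-- the multiset of indices stored in a heap, as a list
def sContents : SHeap → List Int
  | .nil => []
  | .node v l r => v :: (sContents l ++ sContents r)

-- the heap invariant: each root bounds its subtrees from below
def sWF : SHeap → Prop
  | .nil => True
  | .node v l r => (∀ x ∈ sContents l, v ≤ x) ∧ (∀ x ∈ sContents r, v ≤ x) ∧ sWF l ∧ sWF r

theorem sContents_meld (a b : SHeap) :
    (↑(sContents (sMeld a b)) : Multiset Int) = ↑(sContents a) + ↑(sContents b) := by
  induction a, b using sMeld.induct with
  | case1 b => simp [sMeld, sContents]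
  | case2 va la ra => simp [sMeld, sContents]
  | case3 va la ra vb lb rb hlt ih =>
    rw [sMeld, if_pos hlt]
    show (↑(sContents (.node vb (sMeld rb (.node va la ra)) lb)) : Multiset Int) = _
    simp only [sContents, ← Multiset.cons_coe, ← Multiset.coe_add] at ih ⊢
    rw [ih]
    simp only [← Multiset.singleton_add]
    abel
  | case4 va la ra vb lb rb hlt ih =>
    rw [sMeld, if_neg hlt]
    show (↑(sContents (.node va (sMeld ra (.node vb lb rb)) la)) : Multiset Int) = _
    simp only [sContents, ← Multiset.cons_coe, ← Multiset.coe_add] at ih ⊢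
    rw [ih]
    simp only [← Multiset.singleton_add]
    abel

theorem sContents_meld_perm (a b : SHeap) :
    (sContents (sMeld a b)).Perm (sContents a ++ sContents b) := by
  rw [← Multiset.coe_eq_coe, sContents_meld, Multiset.coe_add]

theorem sMem_meld {x : Int} (a b : SHeap) :
    x ∈ sContents (sMeld a b) ↔ x ∈ sContents a ∨ x ∈ sContents b := by
  rw [(sContents_meld_perm a b).mem_iff, List.mem_append]

theorem sWF_meld (a b : SHeap) : sWF a → sWF b → sWF (sMeld a b) := by
  induction a, b using sMeld.induct with
  | case1 b => intro _ hb; simpa [sMeld]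
  | case2 va la ra => intro ha _; simpa [sMeld]
  | case3 va la ra vb lb rb hlt ih =>
    intro ha hb
    obtain ⟨ha1, ha2, ha3, ha4⟩ := ha
    obtain ⟨hb1, hb2, hb3, hb4⟩ := hb
    rw [sMeld, if_pos hlt]
    refine ⟨?_, hb1, ih hb4 ⟨ha1, ha2, ha3, ha4⟩, hb3⟩
    intro x hx
    rcases (sMem_meld _ _).mp hx with hx | hx
    · have := hb2 x hx; omega
    · simp only [sContents, List.mem_cons, List.mem_append] at hx
      rcases hx with rfl | hx | hx
      · omega
      · have := ha1 x hx; omega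
      · have := ha2 x hx; omega
  | case4 va la ra vb lb rb hlt ih =>
    intro ha hb
    obtain ⟨ha1, ha2, ha3, ha4⟩ := ha
    obtain ⟨hb1, hb2, hb3, hb4⟩ := hb
    rw [sMeld, if_neg hlt]
    refine ⟨?_, ha1, ih ha4 ⟨hb1, hb2, hb3, hb4⟩, ha3⟩
    intro x hx
    rcases (sMem_meld _ _).mp hx with hx | hx
    · have := ha2 x hx; omega
    · simp only [sContents, List.mem_cons, List.mem_append] at hx
      rcases hx with rfl | hx | hx
      · omega
      · have := hb1 x hx; omega
      · have := hb2 x hx; omega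

-- the root of a well-formed nonempty heap is a minimum of its contents
theorem sRoot_min (v : Int) (l r : SHeap) (h : sWF (.node v l r)) :
    ∀ x ∈ sContents (.node v l r), v ≤ x := by
  obtain ⟨h1, h2, _, _⟩ := h
  intro x hx
  simp only [sContents, List.mem_cons, List.mem_append] at hx
  rcases hx with rfl | hx | hx
  · exact le_refl x
  · exact h1 x hx
  · exact h2 x hx

-- a heap with nonempty contents is a node
theorem sNe_nil_of_contents {h : SHeap} (hc : sContents h ≠ []) : h ≠ .nil := by
  intro he; subst he; exact hc rfl

-- lookups in A's final dict (insert cur, insert cur+1, insert cur again)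
theorem solve_dget3 {ν : Type} (d : PySem.Dict Int ν) (cur : Int) (X Y Z : ν) (k : Int) :
    (((d.insert cur X).insert (cur + 1) Y).insert cur Z).get? k =
      if k = cur then some Z else if k = cur + 1 then some Y else d.get? k := by
  rw [PySem.Dict.get?_insert, PySem.Dict.get?_insert, PySem.Dict.get?_insert]
  split_ifs <;> rfl

-- lookups in B's final dict (insert cur+1, then insert cur)
theorem solve_dget2 {ν : Type} (d : PySem.Dict Int ν) (cur : Int) (U V : ν) (k : Int) :
    ((d.insert (cur + 1) U).insert cur V).get? k =
      if k = cur then some V else if k = cur + 1 then some U else d.get? k := by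
  rw [PySem.Dict.get?_insert, PySem.Dict.get?_insert]

-- the simulation relation between A's dict of lists and B's dict of heaps
def solveRel (dA : PySem.Dict Int (List Int)) (dB : PySem.Dict Int SHeap) : Prop :=
  ∀ k : Int, (dA.get? k = none ∧ dB.get? k = none) ∨
    ∃ l h, dA.get? k = some l ∧ dB.get? k = some h ∧ h ≠ .nil ∧
      (sContents h).Perm l ∧ sWF h

-- one loop iteration: the arrays stay equal and the relation is preserved
theorem solve_step_rel (i : Nat) (arr : List Int)
    (dA : PySem.Dict Int (List Int)) (dB : PySem.Dict Int SHeap)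
    (hrel : solveRel dA dB) :
    (solveStepA (arr, dA) i).1 = (solveStepB (arr, dB) i).1 ∧
    solveRel (solveStepA (arr, dA) i).2 (solveStepB (arr, dB) i).2 := by
  set cur := arr.getD i 0 with hcur
  rcases hrel cur with ⟨hA, hB⟩ | ⟨l, h, hA, hB, hne, hperm, hwf⟩
  · -- first occurrence of cur
    simp only [solveStepA, solveStepB, ← hcur, hA, hB]
    refine ⟨by trivial, fun k => ?_⟩
    rw [PySem.Dict.get?_insert, PySem.Dict.get?_insert]
    by_cases hk : k = cur
    · subst hk
      exact Or.inr ⟨[(i : Int)], .node (i : Int) .nil .nil, by simp, by simp,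
        by simp, by simp [sContents], by simp [sWF, sContents]⟩
    · simp only [if_neg hk]; exact hrel k
  · -- repeated value: A sorts and pops the head, B pops the heap root
    obtain ⟨j, left, right, rfl⟩ : ∃ j left right, h = SHeap.node j left right := by
      cases h with
      | nil => exact absurd rfl hne
      | node v a b => exact ⟨v, a, b, rfl⟩
    have hlne : l ≠ [] := by
      intro he; subst he
      exact (List.not_mem_nil (a := j)) (hperm.mem_iff.mp (by simp [sContents]))
    obtain ⟨a, t, hls⟩ : ∃ a t, PySem.List.sorted l (fun x => x) false = a :: t := by
      cases hs : PySem.List.sorted l (fun x => x) false with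
      | nil => exact absurd ((PySem.List.sorted_eq_nil_iff _ _ _).mp hs) hlne
      | cons a t => exact ⟨a, t, rfl⟩
    have hlsperm : (a :: t).Perm l := hls ▸ PySem.List.sorted_perm l (fun x => x) false
    -- the head of the sorted bucket is exactly the heap root
    have haj : a = j := by
      have h1 : j ≤ a := sRoot_min j left right hwf a
        (hperm.mem_iff.mpr (hlsperm.mem_iff.mp List.mem_cons_self))
      have hj_l : j ∈ l := hperm.mem_iff.mp (by simp [sContents])
      have h2 : a ≤ j := PySem.List.key_head_sorted_le l (fun x => x) hls j hj_l
      omega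
    subst haj
    -- the sorted tail is a permutation of the two subtrees' contents
    have htail : t.Perm (sContents left ++ sContents right) :=
      (hlsperm.trans hperm.symm).cons_inv
    obtain ⟨hw1, hw2, hwl, hwr⟩ := hwf
    -- the new bucket of cur on B's side: contents and well-formedness
    have hpcur : (sContents (sMeld (.node (i : Int) .nil .nil) (sMeld left right))).Perm
        (t ++ [(i : Int)]) := by
      refine (sContents_meld_perm _ _).trans ?_
      simp only [sContents, List.nil_append, List.singleton_append]
      have hit : ((i : Int) :: sContents (sMeld left right)).Perm ((i : Int) :: t) :=
        ((sContents_meld_perm left right).trans htail.symm).cons _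
      exact hit.trans (List.perm_append_singleton _ _).symm
    have hnnil_cur : sMeld (.node (i : Int) .nil .nil) (sMeld left right) ≠ .nil := by
      apply sNe_nil_of_contents
      intro he
      have := hpcur
      rw [he] at this
      simpa using this.symm.eq_nil
    have hwf_cur : sWF (sMeld (.node (i : Int) .nil .nil) (sMeld left right)) :=
      sWF_meld _ _ (by simp [sWF, sContents]) (sWF_meld _ _ hwl hwr)
    -- lookups in A's intermediate dict d1
    have hnext : (dA.insert cur (a :: t)).get? (cur + 1) = dA.get? (cur + 1) :=
      PySem.Dict.get?_insert_of_ne _ _ (by omega)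
    rcases hrel (cur + 1) with ⟨hA1, hB1⟩ | ⟨l1, h1, hA1, hB1, hne1, hperm1, hwf1⟩
    · -- cur+1 not yet a key: the migrated index starts a fresh bucket
      simp only [solveStepA, solveStepB, ← hcur, hA, hB, hls, List.headD_cons,
        List.drop_succ_cons, List.drop_zero, hnext, hA1, hB1, Option.getD_none]
      refine ⟨by trivial, fun k => ?_⟩
      rw [solve_dget3, solve_dget2]
      by_cases hk : k = cur
      · simp only [if_pos hk]
        exact Or.inr ⟨t ++ [(i : Int)], _, rfl, rfl, hnnil_cur, hpcur, hwf_cur⟩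
      · by_cases hk1 : k = cur + 1
        · simp only [if_neg hk, if_pos hk1]
          exact Or.inr ⟨[a], _, rfl, rfl, by simp [sMeld],
            by simp [sMeld, sContents], by simp [sMeld, sWF, sContents]⟩
        · simp only [if_neg hk, if_neg hk1]
          exact hrel k
    · -- cur+1 already a key: the migrated index joins its bucket
      have hpnext : (sContents (sMeld (.node a .nil .nil) h1)).Perm (l1 ++ [a]) := by
        refine (sContents_meld_perm _ _).trans ?_
        simp only [sContents, List.nil_append, List.singleton_append]
        exact (hperm1.cons a).trans (List.perm_append_singleton _ _).symm
      have hnnil_next : sMeld (.node a .nil .nil) h1 ≠ .nil := by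
        apply sNe_nil_of_contents
        intro he
        have := hpnext
        rw [he] at this
        simpa using this.symm.eq_nil
      have hwf_next : sWF (sMeld (.node a .nil .nil) h1) :=
        sWF_meld _ _ (by simp [sWF, sContents]) hwf1
      simp only [solveStepA, solveStepB, ← hcur, hA, hB, hls, List.headD_cons,
        List.drop_succ_cons, List.drop_zero, hnext, hA1, hB1, Option.getD_some]
      refine ⟨by trivial, fun k => ?_⟩
      rw [solve_dget3, solve_dget2]
      by_cases hk : k = cur
      · simp only [if_pos hk]
        exact Or.inr ⟨t ++ [(i : Int)], _, rfl, rfl, hnnil_cur, hpcur, hwf_cur⟩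
      · by_cases hk1 : k = cur + 1
        · simp only [if_neg hk, if_pos hk1]
          exact Or.inr ⟨l1 ++ [a], _, rfl, rfl, hnnil_next, hpnext, hwf_next⟩
        · simp only [if_neg hk, if_neg hk1]
          exact hrel k

-- the two loops agree in lockstep, carrying the relation
theorem solve_loop_rel (n : Nat) : ∀ (i : Nat) (arr : List Int)
    (dA : PySem.Dict Int (List Int)) (dB : PySem.Dict Int SHeap), solveRel dA dB →
    (solveLoopA n i (arr, dA)).1 = ((List.range' i n).foldl solveStepB (arr, dB)).1 := by
  induction n with
  | zero => intro i arr dA dB _; rfl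
  | succ n ih =>
    intro i arr dA dB hrel
    obtain ⟨h1, h2⟩ := solve_step_rel i arr dA dB hrel
    show (solveLoopA n (i + 1) (solveStepA (arr, dA) i)).1 =
      ((List.range' (i + 1) n).foldl solveStepB (solveStepB (arr, dB) i)).1
    have key := ih (i + 1) (solveStepA (arr, dA) i).1 (solveStepA (arr, dA) i).2
      (solveStepB (arr, dB) i).2 h2
    have e : ((solveStepA (arr, dA) i).1, (solveStepB (arr, dB) i).2) =
        solveStepB (arr, dB) i := by rw [h1]
    rw [e] at key
    exact key

-- ===== VERDICT (by name: the statement is the Claim_ definition above) =====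
theorem solve_spec : Claim_equal_solve := by
  intro A _
  unfold Spec_solve solve solve_alt
  rw [List.range_eq_range']
  exact solve_loop_rel A.length 0 A PySem.Dict.empty PySem.Dict.empty
    (fun k => Or.inl ⟨by simp [PySem.Dict.get?, PySem.Dict.empty],
      by simp [PySem.Dict.get?, PySem.Dict.empty]⟩)
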